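-- pv_equiv track=rewrite | github.com/Cesar073/Punto-Venta-3 | sources/mod/form.py | Line_Num_Coma_
-- ===== SOURCE A (Python) =====
-- def Line_Num_Coma_(Texto):
--     aux = ""
--     coma = False
--     for i in Texto:
--         if Es_Numero_Int(i):
--             aux += i
--         elif (i == "," or i == ".") and coma == False:
--             # Si se ha borrado un valor anterior a la coma o bien el usuario sólo apretó el punto, le escribimos un cero delante
--             if aux == "":
--                 aux = "0,"
--             else:
--                 aux += ","
--             coma = True
--     return aux
--
-- def Es_Numero_Int(Valor):
--     try:
--         resultado = int(Valor)
--         return True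
--     except ValueError:
--         return False
-- ===== SOURCE B (Python) =====
-- def Es_Numero_Int(Valor):
--     try:
--         resultado = int(Valor)
--         return True
--     except ValueError:
--         return False
--
-- def Line_Num_Coma_(Texto):
--     sep = next((k for k, ch in enumerate(Texto) if ch == "," or ch == "."), None)
--     if sep is None:
--         return "".join(ch for ch in Texto if Es_Numero_Int(ch))
--     left = "".join(ch for ch in Texto[:sep] if Es_Numero_Int(ch))
--     right = "".join(ch for ch in Texto[sep + 1:] if Es_Numero_Int(ch))
--     return ("0," if left == "" else left + ",") + right
-- ===== Notes on version B (the rewrite author's own statement) =====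
-- stated objective: alternative
-- what changed: Replaces A's single stateful scan carrying a 'coma' flag by locating the first ',' or '.' and filtering the prefix and suffix separately, assembling the result from the two filtered halves.
import Mathlib
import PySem

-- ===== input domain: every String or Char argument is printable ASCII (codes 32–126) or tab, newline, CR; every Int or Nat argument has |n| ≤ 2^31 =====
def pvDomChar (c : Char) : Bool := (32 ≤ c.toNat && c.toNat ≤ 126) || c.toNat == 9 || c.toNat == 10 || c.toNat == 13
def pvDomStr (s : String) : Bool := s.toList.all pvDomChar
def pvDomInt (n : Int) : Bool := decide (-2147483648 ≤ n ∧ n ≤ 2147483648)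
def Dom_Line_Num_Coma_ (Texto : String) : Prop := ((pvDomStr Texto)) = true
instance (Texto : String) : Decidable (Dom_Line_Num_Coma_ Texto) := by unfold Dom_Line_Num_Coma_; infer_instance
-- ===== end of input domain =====

-- B locates the first ',' or '.' and filters the prefix and suffix separately (same O(n) cost, different decomposition), instead of A's stateful single scan.


-- ===== PORT A =====
-- Es_Numero_Int(ch): int(ch) succeeds (exact via PySem.Int.ofChars?)
def esNumeroInt (c : Char) : Bool := (PySem.Int.ofChars? [c]).isSome

-- the loop body of A: state (aux, coma)
def lncStep (s : List Char × Bool) (i : Char) : List Char × Bool :=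
  if esNumeroInt i then (s.1 ++ [i], s.2)
  else if (i = ',' ∨ i = '.') ∧ s.2 = false then
    (if s.1 = [] then ['0', ','] else s.1 ++ [','], true)
  else s

def Line_Num_Coma_ (Texto : String) : String :=
  String.mk (Texto.toList.foldl lncStep ([], false)).1

-- ===== PORT B =====
-- index of the first ',' or '.' (port of the next(enumerate…) scan)
def lncFindSep : List Char → Option Nat
  | [] => none
  | c :: l => if c = ',' || c = '.' then some 0 else (lncFindSep l).map (· + 1)

def Line_Num_Coma__alt (Texto : String) : String :=
  let cs := Texto.toList
  match lncFindSep cs with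
  | none => String.mk (cs.filter esNumeroInt)
  | some k =>
    let left := (cs.take k).filter esNumeroInt
    let right := (cs.drop (k + 1)).filter esNumeroInt
    String.mk ((if left = [] then ['0', ','] else left ++ [',']) ++ right)

-- ===== PRECONDITION & SPEC =====
def Spec_Line_Num_Coma_ (Texto : String) (out : String) : Prop := out = Line_Num_Coma__alt Texto
instance (Texto : String) (out : String) : Decidable (Spec_Line_Num_Coma_ Texto out) := by unfold Spec_Line_Num_Coma_; infer_instance

-- ===== CLAIM (what is proved, stated in full; the proofs are below) =====
def Claim_equal_Line_Num_Coma_ : Prop := ∀ (Texto : String), Dom_Line_Num_Coma_ Texto → Spec_Line_Num_Coma_ Texto (Line_Num_Coma_ Texto)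

-- ===== LEMMAS AND PROOFS =====

theorem esNum_comma : esNumeroInt ',' = false := by decide
theorem esNum_dot : esNumeroInt '.' = false := by decide

-- once coma = true, the fold just appends the remaining digits
theorem fold_coma_true (l : List Char) (aux : List Char) :
    l.foldl lncStep (aux, true) = (aux ++ l.filter esNumeroInt, true) := by
  induction l generalizing aux with
  | nil => simp
  | cons c l ih =>
    by_cases hc : esNumeroInt c = true
    · simp [List.foldl_cons, lncStep, hc, ih, List.filter_cons]
    · simp [List.foldl_cons, lncStep, hc, ih, List.filter_cons]

-- while coma = false, the fold's result is characterised by the first separator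
theorem fold_coma_false (l : List Char) (aux : List Char) :
    (l.foldl lncStep (aux, false)).1 =
      match lncFindSep l with
      | none => aux ++ l.filter esNumeroInt
      | some k =>
        (if aux ++ (l.take k).filter esNumeroInt = [] then ['0', ',']
         else aux ++ (l.take k).filter esNumeroInt ++ [',']) ++
        (l.drop (k + 1)).filter esNumeroInt := by
  induction l generalizing aux with
  | nil => simp [lncFindSep]
  | cons c l ih =>
    by_cases hsep : (c = ',' || c = '.') = true
    · have hc : esNumeroInt c = false := by
        rcases Bool.or_eq_true_iff.mp hsep with h | h
        · simp [decide_eq_true_eq.mp h, esNum_comma]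
        · simp [decide_eq_true_eq.mp h, esNum_dot]
      have hsep' : (c = ',' ∨ c = '.') := by
        rcases Bool.or_eq_true_iff.mp hsep with h | h
        · exact Or.inl (decide_eq_true_eq.mp h)
        · exact Or.inr (decide_eq_true_eq.mp h)
      simp only [List.foldl_cons, lncStep, hc, Bool.false_eq_true, if_false, hsep',
        and_self, if_true, lncFindSep, hsep]
      rcases em (aux = []) with h | h <;>
        simp [h, fold_coma_true, List.take, List.drop]
    · have hc2 : ¬ (c = ',' ∨ c = '.') := by
        intro h; apply hsep; rcases h with h | h <;> simp [h]
      by_cases hc : esNumeroInt c = true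
      · simp only [List.foldl_cons, lncStep, hc, if_true]
        rw [ih]
        simp only [lncFindSep, hsep, if_false]
        cases hfs : lncFindSep l with
        | none => simp [List.filter_cons, hc]
        | some k =>
          simp [List.filter_cons, hc, List.take_succ_cons, List.drop_succ_cons]
      · simp only [List.foldl_cons, lncStep, hc, Bool.false_eq_true, if_false, hc2,
          false_and, if_false]
        rw [ih]
        simp only [lncFindSep, hsep, if_false]
        cases hfs : lncFindSep l with
        | none => simp [List.filter_cons, hc]
        | some k =>
          simp [List.filter_cons, hc, List.take_succ_cons, List.drop_succ_cons]

-- ===== VERDICT (by name: the statement is the Claim_ definition above) =====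
theorem Line_Num_Coma__spec : Claim_equal_Line_Num_Coma_ := by
  intro Texto _
  unfold Spec_Line_Num_Coma_ Line_Num_Coma_ Line_Num_Coma__alt
  rw [fold_coma_false]
  cases hfs : lncFindSep Texto.toList with
  | none => simp only [hfs, List.nil_append]
  | some k => simp only [hfs, List.nil_append]
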